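-- pv_equiv track=rewrite | github.com/subhasis-98/python-prog | python-lab-assignment/assignment5/Q2.PY | replace_repeats_with_star
-- ===== SOURCE A (Python) =====
-- def replace_repeats_with_star(s):
--     result = " "
--     for i in range(len(s)):
--         # Check if it's the first character or different from the previous one
--         if i > 0 and s[i] == s[i - 1]:
--             result += "*"
--         else:
--             result += s[i]
--     return result
-- ===== SOURCE B (Python) =====
-- from itertools import groupby
--
--
-- def replace_repeats_with_star(s):
--     parts = [" "]
--     for ch, grp in groupby(s):
--         run = sum(1 for _ in grp)
--         parts.append(ch + "*" * (run - 1))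
--     return "".join(parts)
-- ===== Notes on version B (the rewrite author's own statement) =====
-- stated objective: idiomatic
-- what changed: B iterates over maximal runs of equal characters via itertools.groupby and joins per-run pieces (char plus run-1 stars), instead of A's per-index comparison of s[i] with s[i-1] with repeated string concatenation.
import Mathlib
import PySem

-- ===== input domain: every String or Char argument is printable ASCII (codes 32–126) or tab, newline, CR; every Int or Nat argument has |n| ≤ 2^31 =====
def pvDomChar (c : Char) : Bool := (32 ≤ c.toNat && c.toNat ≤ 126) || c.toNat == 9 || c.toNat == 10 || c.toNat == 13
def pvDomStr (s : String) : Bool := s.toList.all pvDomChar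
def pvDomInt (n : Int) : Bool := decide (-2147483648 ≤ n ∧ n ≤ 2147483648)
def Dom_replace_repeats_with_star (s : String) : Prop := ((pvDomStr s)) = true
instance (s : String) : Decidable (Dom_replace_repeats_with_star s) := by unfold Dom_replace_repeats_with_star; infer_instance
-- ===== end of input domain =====

-- B replaces A's index-vs-previous comparison with an itertools.groupby pass over maximal runs (same return value; more idiomatic).
-- ===== PORT A =====
-- A: seed result with " ", then for each index i append "*" when s[i] == s[i-1], else s[i].
def replace_repeats_with_star (s : String) : String :=
  let cs : List Char := s.toList
  (PySem.List.pyRange 0 cs.length 1).foldl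
    (fun result i =>
      if i > 0 ∧ PySem.List.pyGet? cs i = PySem.List.pyGet? cs (i - 1) then
        result ++ "*"
      else
        result ++ String.ofList (PySem.List.pyGet? cs i).toList) " "

-- ===== PORT B =====
-- B: itertools.groupby — iterate over maximal runs; emit the char once plus (run-1) stars.
def pvGroupRuns (cs : List Char) : List (Char × Nat) :=
  match cs with
  | [] => []
  | c :: rest =>
    (c, (rest.takeWhile (fun d => d = c)).length + 1) ::
      pvGroupRuns (rest.dropWhile (fun d => d = c))
termination_by cs.length
decreasing_by
  have := List.length_dropWhile_le (fun d => d = c) rest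
  simp; omega

def replace_repeats_with_star_alt (s : String) : String :=
  (pvGroupRuns s.toList).foldl
    (fun parts p => parts ++ String.ofList (p.1 :: List.replicate (p.2 - 1) '*')) " "

-- ===== PRECONDITION & SPEC =====
def Spec_replace_repeats_with_star (s : String) (out : String) : Prop := out = replace_repeats_with_star_alt s
instance (s : String) (out : String) : Decidable (Spec_replace_repeats_with_star s out) := by unfold Spec_replace_repeats_with_star; infer_instance

-- ===== CLAIM (what is proved, stated in full; the proofs are below) =====
def Claim_equal_replace_repeats_with_star : Prop := ∀ (s : String), Dom_replace_repeats_with_star s → Spec_replace_repeats_with_star s (replace_repeats_with_star s)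

-- ===== LEMMAS AND PROOFS =====

-- Reference emission: one output char per input char, '*' when it equals the previous one.
def pvGo (prev : Option Char) : List Char → List Char
  | [] => []
  | c :: rest => (if some c = prev then '*' else c) :: pvGo (some c) rest

-- the previous character after consuming xs (prev if xs is empty)
def pvPrev (prev : Option Char) (xs : List Char) : Option Char :=
  match xs.getLast? with
  | some d => some d
  | none => prev

theorem pvPrev_cons (prev : Option Char) (x : Char) (t : List Char) :
    pvPrev prev (x :: t) = pvPrev (some x) t := by
  cases t with
  | nil => simp [pvPrev]
  | cons y u =>
    simp only [pvPrev, List.getLast?_cons_cons]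
    cases h : (y :: u).getLast? with
    | some d => simp
    | none => simp [List.getLast?_eq_none_iff] at h

theorem pvGo_append_singleton (xs : List Char) (prev : Option Char) (c : Char) :
    pvGo prev (xs ++ [c]) =
      pvGo prev xs ++ [if some c = pvPrev prev xs then '*' else c] := by
  induction xs generalizing prev with
  | nil => simp [pvGo, pvPrev]
  | cons x t ih => simp [pvGo, ih (some x), pvPrev_cons]

theorem pvPrev_none_take (cs : List Char) (n : Nat) (h1 : 1 ≤ n) (hn : n < cs.length) :
    pvPrev none (cs.take n) = some cs[n - 1] := by
  have hlen : (cs.take n).length = n := by simp; omega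
  rw [pvPrev, List.getLast?_eq_getElem?, hlen]
  have h2 : (List.take n cs)[n - 1]? = some cs[n - 1] := by
    rw [List.getElem?_take_of_lt (by omega)]
    exact List.getElem?_eq_getElem (by omega)
  rw [h2]

-- A-side characterisation: the foldl over range(len) builds " " ++ pvGo none cs.
theorem portA_eq_go (cs : List Char) (n : Nat) (hn : n ≤ cs.length) :
    (PySem.List.pyRange 0 (n : Int) 1).foldl
      (fun result i =>
        if i > 0 ∧ PySem.List.pyGet? cs i = PySem.List.pyGet? cs (i - 1) then
          result ++ "*"
        else
          result ++ String.ofList (PySem.List.pyGet? cs i).toList) " "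
      = " " ++ String.ofList (pvGo none (cs.take n)) := by
  induction n with
  | zero =>
    apply String.toList_inj.mp
    simp [pvGo]
  | succ m ih =>
    have hm : m ≤ cs.length := by omega
    have hcast : ((m : Int) + 1) = ((m + 1 : Nat) : Int) := by push_cast; ring
    rw [← hcast, PySem.List.pyRange_one_succ_right (by positivity), List.foldl_append,
      ih hm]
    simp only [List.foldl_cons, List.foldl_nil]
    have htake : cs.take (m + 1) = cs.take m ++ [cs[m]] :=
      List.take_succ_eq_append_getElem (by omega)
    rw [htake, pvGo_append_singleton]
    have hget : PySem.List.pyGet? cs (m : Int) = some cs[m] := by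
      rw [PySem.List.pyGet?_natCast]
      exact List.getElem?_eq_getElem (by omega)
    by_cases hm0 : m = 0
    · subst hm0
      rw [if_neg (by simp), hget]
      rw [if_neg (by simp [pvPrev])]
      apply String.toList_inj.mp
      simp
    · have h1 : 1 ≤ m := by omega
      have hgetp : PySem.List.pyGet? cs ((m : Int) - 1) = some cs[m - 1] := by
        have h : ((m : Int) - 1) = ((m - 1 : Nat) : Int) := by push_cast [h1]; ring
        rw [h, PySem.List.pyGet?_natCast]
        exact List.getElem?_eq_getElem (by omega)
      rw [pvPrev_none_take cs m h1 (by omega)]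
      by_cases heq : cs[m] = cs[m - 1]
      · rw [if_pos ⟨by exact_mod_cast h1, by rw [hget, hgetp, heq]⟩, if_pos (by rw [heq])]
        apply String.toList_inj.mp
        simp
      · rw [if_neg (by rintro ⟨-, h2⟩; rw [hget, hgetp] at h2; exact heq (Option.some.inj h2)),
          if_neg (by simpa using heq), hget]
        apply String.toList_inj.mp
        simp

-- skipping a run of chars equal to prev emits stars and keeps prev
theorem pvGo_run (ts : List Char) (c : Char) (h : ∀ x ∈ ts, x = c) (r : List Char) :
    pvGo (some c) (ts ++ r) = List.replicate ts.length '*' ++ pvGo (pvPrev (some c) ts) r := by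
  induction ts with
  | nil => simp [pvPrev]
  | cons x t ih =>
    have hx : x = c := h x (by simp)
    subst hx
    have ht : ∀ y ∈ t, y = x := fun y hy => h y (by simp [hy])
    simp [pvGo, List.replicate_succ, ih ht, pvPrev_cons]

theorem pvGo_head_ne (p : Option Char) (xs : List Char)
    (h : ∀ x, xs.head? = some x → some x ≠ p) :
    pvGo p xs = pvGo none xs := by
  cases xs with
  | nil => rfl
  | cons x t =>
    have := h x (by simp)
    simp [pvGo, this]

-- B-side characterisation: flattening the runs reproduces pvGo none cs.
theorem runs_flatMap (cs : List Char) :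
    (pvGroupRuns cs).flatMap (fun p => p.1 :: List.replicate (p.2 - 1) '*') = pvGo none cs := by
  induction cs using pvGroupRuns.induct with
  | case1 => simp [pvGroupRuns, pvGo]
  | case2 c rest ih =>
    rw [pvGroupRuns]
    simp only [List.flatMap_cons, ih, Nat.add_sub_cancel]
    have hsplit : rest = rest.takeWhile (fun d => d = c) ++ rest.dropWhile (fun d => d = c) :=
      (List.takeWhile_append_dropWhile).symm
    have hall : ∀ x ∈ rest.takeWhile (fun d => d = c), x = c := by
      intro x hx
      have := List.mem_takeWhile_imp hx
      simpa using this
    have hprev : pvPrev (some c) (rest.takeWhile (fun d => d = c)) = some c := by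
      cases hlast : (rest.takeWhile (fun d => d = c)).getLast? with
      | none => simp [pvPrev, hlast]
      | some d =>
        have hd : d ∈ rest.takeWhile (fun d => d = c) := List.mem_of_getLast? hlast
        simp [pvPrev, hlast, hall d hd]
    have hhead : ∀ x, (rest.dropWhile (fun d => d = c)).head? = some x → some x ≠ some c := by
      intro x hx hc
      have h2 := List.head?_dropWhile_not (fun d => decide (d = c)) rest
      rw [hx] at h2
      simp at h2
      exact h2 (by simpa using hc)
    refine Eq.symm ?_
    calc pvGo none (c :: rest)
        = c :: pvGo (some c)
            (rest.takeWhile (fun d => d = c) ++ rest.dropWhile (fun d => d = c)) := by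
          rw [← hsplit]; simp [pvGo]
      _ = c :: (List.replicate (rest.takeWhile (fun d => d = c)).length '*' ++
            pvGo none (rest.dropWhile (fun d => d = c))) := by
          rw [pvGo_run _ c hall, hprev, pvGo_head_ne _ _ hhead]
      _ = _ := by simp

-- folding string pieces = one ofList of the flatMap
theorem foldl_str_append (g : Char × Nat → List Char) (l : List (Char × Nat)) (acc : String) :
    l.foldl (fun parts p => parts ++ String.ofList (g p)) acc
      = acc ++ String.ofList (l.flatMap g) := by
  induction l generalizing acc with
  | nil =>
    apply String.toList_inj.mp
    simp
  | cons p t ih =>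
    rw [List.foldl_cons, ih]
    apply String.toList_inj.mp
    simp

-- ===== VERDICT (by name: the statement is the Claim_ definition above) =====
theorem replace_repeats_with_star_spec : Claim_equal_replace_repeats_with_star := by
  intro s _
  unfold Spec_replace_repeats_with_star replace_repeats_with_star replace_repeats_with_star_alt
  rw [foldl_str_append, runs_flatMap]
  have h := portA_eq_go s.toList s.toList.length le_rfl
  rw [List.take_length] at h
  simpa using h
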